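-- pv_equiv track=rewrite | github.com/viettran295/cryptoTracking | Leet/sortByParity.py | sortParityII
-- ===== SOURCE A (Python) =====
-- from typing import List
--
-- def sortParityII(nums:List[int])->List[int]:
--     i = 0
--     j = 1
--     while i<len(nums) and j<len(nums):
--         if nums[i]&1==0:
--             i+=2
--         elif nums[j]&1:
--             j+=2
--         else:
--             nums[i], nums[j] = nums[j], nums[i]
--             i+=2
--             j+=2
--     return nums
-- ===== SOURCE B (Python) =====
-- from typing import List
--
-- def sortParityII(nums: List[int]) -> List[int]:
--     n = len(nums)
--     bad_even = [k for k in range(n) if k % 2 == 0 and nums[k] % 2 == 1]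
--     bad_odd  = [k for k in range(n) if k % 2 == 1 and nums[k] % 2 == 0]
--     for i, j in zip(bad_even, bad_odd):
--         nums[i], nums[j] = nums[j], nums[i]
--     return nums
-- ===== Notes on version B (the rewrite author's own statement) =====
-- stated objective: alternative
-- what changed: Replaces A's interleaved two-pointer while loop by a build-then-pair decomposition: two passes precompute the misplaced even-index and misplaced odd-index tables, then zip pairs them and performs the swaps; zip truncation reproduces A's stopping rule when the counts differ.
import Mathlib
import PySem

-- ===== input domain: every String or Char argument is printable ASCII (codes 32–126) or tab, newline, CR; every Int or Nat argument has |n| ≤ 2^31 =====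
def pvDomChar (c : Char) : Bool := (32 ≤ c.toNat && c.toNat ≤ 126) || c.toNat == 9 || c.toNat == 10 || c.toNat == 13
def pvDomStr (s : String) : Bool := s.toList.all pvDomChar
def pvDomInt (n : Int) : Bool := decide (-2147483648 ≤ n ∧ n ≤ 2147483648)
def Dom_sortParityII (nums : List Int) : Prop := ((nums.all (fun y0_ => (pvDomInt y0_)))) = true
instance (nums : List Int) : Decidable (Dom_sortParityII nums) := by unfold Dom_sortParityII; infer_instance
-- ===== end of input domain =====

-- ===== PORT A =====
-- B replaces A's interleaved two-pointer scan by two index-table passes + paired swaps (alternative decomposition).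
-- Both Pythons mutate `nums` in place and return it; final contents coincide, so the equivalence is about the returned list.
-- A's while loop: i over even indices, j over odd indices, swapping misplaced pairs.
def sortParityII.loop : Nat → List Int → Nat → Nat → List Int
  | 0, nums, _, _ => nums
  | fuel + 1, nums, i, j =>
    if i < nums.length ∧ j < nums.length then
      if nums.getD i 0 % 2 = 0 then
        sortParityII.loop fuel nums (i + 2) j
      else if nums.getD j 0 % 2 = 1 then
        sortParityII.loop fuel nums i (j + 2)
      else
        -- nums[i], nums[j] = nums[j], nums[i]
        let a := nums.getD i 0
        let b := nums.getD j 0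
        sortParityII.loop fuel ((nums.set i b).set j a) (i + 2) (j + 2)
    else nums
    -- fuel only makes the while loop structurally recursive: each iteration raises i + j by ≥ 2,
    -- so fuel = nums.length + 1 is never exhausted before the loop guard fails

def sortParityII (nums : List Int) : List Int :=
  sortParityII.loop (nums.length + 1) nums 0 1

-- ===== PORT B =====
-- one paired swap: nums[i], nums[j] = nums[j], nums[i]
def sortParityII_alt.swap (acc : List Int) (p : Nat × Nat) : List Int :=
  let a := acc.getD p.1 0
  let b := acc.getD p.2 0
  (acc.set p.1 b).set p.2 a

def sortParityII_alt (nums : List Int) : List Int :=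
  let n := nums.length
  let badEven := (List.range n).filter (fun k => decide (k % 2 = 0) && decide (nums.getD k 0 % 2 = 1))
  let badOdd  := (List.range n).filter (fun k => decide (k % 2 = 1) && decide (nums.getD k 0 % 2 = 0))
  (badEven.zip badOdd).foldl sortParityII_alt.swap nums

-- ===== PRECONDITION & SPEC =====
def Spec_sortParityII (nums : List Int) (out : List Int) : Prop := out = sortParityII_alt nums
instance (nums : List Int) (out : List Int) : Decidable (Spec_sortParityII nums out) := by unfold Spec_sortParityII; infer_instance

-- ===== CLAIM (what is proved, stated in full; the proofs are below) =====
def Claim_equal_sortParityII : Prop := ∀ (nums : List Int), Dom_sortParityII nums → Spec_sortParityII nums (sortParityII nums)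

-- ===== LEMMAS AND PROOFS =====

-- misplaced even indices ≥ i / misplaced odd indices ≥ j of the current list
def specE (nums : List Int) (i : Nat) : List Nat :=
  (List.range nums.length).filter (fun k => decide (i ≤ k) && decide (k % 2 = 0) && decide (nums.getD k 0 % 2 = 1))

def specO (nums : List Int) (j : Nat) : List Nat :=
  (List.range nums.length).filter (fun k => decide (j ≤ k) && decide (k % 2 = 1) && decide (nums.getD k 0 % 2 = 0))

theorem specE_nil (nums : List Int) (i : Nat) (h : nums.length ≤ i) : specE nums i = [] := by
  unfold specE
  apply List.filter_eq_nil_iff.mpr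
  intro k hk
  simp only [List.mem_range] at hk
  simp only [Bool.and_eq_true, decide_eq_true_eq, not_and]
  omega

theorem specO_nil (nums : List Int) (j : Nat) (h : nums.length ≤ j) : specO nums j = [] := by
  unfold specO
  apply List.filter_eq_nil_iff.mpr
  intro k hk
  simp only [List.mem_range] at hk
  simp only [Bool.and_eq_true, decide_eq_true_eq, not_and]
  omega

theorem specE_skip (nums : List Int) (i : Nat) (hi : i % 2 = 0)
    (hv : nums.getD i 0 % 2 = 0) : specE nums i = specE nums (i + 2) := by
  unfold specE
  apply List.filter_congr
  intro k hk
  simp only [List.getD_eq_getElem?_getD] at hv ⊢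
  by_cases h1 : k % 2 = 0
  · by_cases h2 : nums[k]?.getD 0 % 2 = 1
    · have hki : k ≠ i := by rintro rfl; rw [hv] at h2; exact absurd h2 (by decide)
      simp only [h1, h2, decide_true, Bool.and_true]
      rw [decide_eq_decide]
      omega
    · simp [h2]
  · simp [h1]

theorem specO_skip (nums : List Int) (j : Nat) (hj : j % 2 = 1)
    (hv : nums.getD j 0 % 2 = 1) : specO nums j = specO nums (j + 2) := by
  unfold specO
  apply List.filter_congr
  intro k hk
  simp only [List.getD_eq_getElem?_getD] at hv ⊢
  by_cases h1 : k % 2 = 1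
  · by_cases h2 : nums[k]?.getD 0 % 2 = 0
    · have hkj : k ≠ j := by rintro rfl; rw [hv] at h2; exact absurd h2 (by decide)
      simp only [h1, h2, decide_true, Bool.and_true]
      rw [decide_eq_decide]
      omega
    · simp [h2]
  · simp [h1]

-- generic head lemma for a filter over range: if a is the first index satisfying p
theorem filter_range_head (n a : Nat) (p q : Nat → Bool) (han : a < n) (hpa : p a = true)
    (hlow : ∀ k, k ≤ a → q k = false) (hlow' : ∀ k, k < a → p k = false)
    (hhigh : ∀ k, a < k → p k = q k) :
    (List.range n).filter p = a :: (List.range n).filter q := by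
  have hsplit : n = (a + 1) + (n - (a + 1)) := by omega
  rw [hsplit, List.range_add, List.filter_append, List.filter_append, List.range_succ,
    List.filter_append, List.filter_append]
  have h1 : (List.range a).filter p = [] :=
    List.filter_eq_nil_iff.mpr (by intro k hk; simp only [List.mem_range] at hk; simp [hlow' k hk])
  have h2 : (List.range (a+1)).filter q = [] :=
    List.filter_eq_nil_iff.mpr (by intro k hk; simp only [List.mem_range] at hk; simp [hlow k (by omega)])
  rw [List.range_succ, List.filter_append] at h2
  have h3 : ((List.range (n - (a+1))).map (fun x => a + 1 + x)).filter p
      = ((List.range (n - (a+1))).map (fun x => a + 1 + x)).filter q := by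
    apply List.filter_congr
    intro k hk
    simp only [List.mem_map, List.mem_range] at hk
    obtain ⟨x, _, rfl⟩ := hk
    exact hhigh _ (by omega)
  rw [h1, h2, h3]
  simp [hpa]

theorem specE_head (nums : List Int) (i : Nat) (hin : i < nums.length) (hi : i % 2 = 0)
    (hv : nums.getD i 0 % 2 = 1) : specE nums i = i :: specE nums (i + 2) := by
  unfold specE
  simp only [List.getD_eq_getElem?_getD] at hv
  apply filter_range_head _ _ _ _ hin
  · simp [hi, hv]
  · intro k hk
    by_cases h1 : k % 2 = 0
    · simp only [Bool.and_eq_false_iff, decide_eq_false_iff_not]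
      left; left; omega
    · simp [h1]
  · intro k hk
    simp only [Bool.and_eq_false_iff, decide_eq_false_iff_not]
    left; left; omega
  · intro k hk
    by_cases h1 : k % 2 = 0
    · have h4 : decide (i ≤ k) = decide (i + 2 ≤ k) := by
        rw [decide_eq_decide]; omega
      rw [h4]
    · simp [h1]

theorem specO_head (nums : List Int) (j : Nat) (hjn : j < nums.length) (hj : j % 2 = 1)
    (hv : nums.getD j 0 % 2 = 0) : specO nums j = j :: specO nums (j + 2) := by
  unfold specO
  simp only [List.getD_eq_getElem?_getD] at hv
  apply filter_range_head _ _ _ _ hjn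
  · simp [hj, hv]
  · intro k hk
    by_cases h1 : k % 2 = 1
    · simp only [Bool.and_eq_false_iff, decide_eq_false_iff_not]
      left; left; omega
    · simp [h1]
  · intro k hk
    simp only [Bool.and_eq_false_iff, decide_eq_false_iff_not]
    left; left; omega
  · intro k hk
    by_cases h1 : k % 2 = 1
    · have h4 : decide (j ≤ k) = decide (j + 2 ≤ k) := by
        rw [decide_eq_decide]; omega
      rw [h4]
    · simp [h1]

theorem specE_set (nums : List Int) (i j : Nat) (a b : Int) (hi : i % 2 = 0) (hj : j % 2 = 1) :
    specE ((nums.set i b).set j a) (i + 2) = specE nums (i + 2) := by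
  unfold specE
  rw [List.length_set, List.length_set]
  apply List.filter_congr
  intro k hk
  by_cases h1 : k % 2 = 0
  · by_cases h2 : i + 2 ≤ k
    · have e : ((nums.set i b).set j a)[k]? = nums[k]? := by
        rw [List.getElem?_set_ne (by omega), List.getElem?_set_ne (by omega)]
      simp only [List.getD_eq_getElem?_getD, e]
    · simp [h2]
  · simp [h1]

theorem specO_set (nums : List Int) (i j : Nat) (a b : Int) (hi : i % 2 = 0) (hj : j % 2 = 1) :
    specO ((nums.set i b).set j a) (j + 2) = specO nums (j + 2) := by
  unfold specO
  rw [List.length_set, List.length_set]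
  apply List.filter_congr
  intro k hk
  by_cases h1 : k % 2 = 1
  · by_cases h2 : j + 2 ≤ k
    · have e : ((nums.set i b).set j a)[k]? = nums[k]? := by
        rw [List.getElem?_set_ne (by omega), List.getElem?_set_ne (by omega)]
      simp only [List.getD_eq_getElem?_getD, e]
    · simp [h2]
  · simp [h1]

theorem main_loop (fuel : Nat) (nums : List Int) (i j : Nat) (hi : i % 2 = 0) (hj : j % 2 = 1)
    (hfuel : 2 * nums.length ≤ i + j + 2 * fuel + 1) :
    sortParityII.loop fuel nums i j
      = ((specE nums i).zip (specO nums j)).foldl sortParityII_alt.swap nums := by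
  induction fuel generalizing nums i j with
  | zero =>
    show nums = _
    by_cases hi' : i < nums.length
    · rw [specO_nil nums j (by omega), List.zip_nil_right]
      rfl
    · rw [specE_nil nums i (by omega), List.zip_nil_left]
      rfl
  | succ fuel ih =>
    show (if i < nums.length ∧ j < nums.length then _ else nums) = _
    by_cases h : i < nums.length ∧ j < nums.length
    · rw [if_pos h]
      by_cases h1 : nums.getD i 0 % 2 = 0
      · rw [if_pos h1]
        rw [ih nums (i + 2) j (by omega) hj (by omega)]
        rw [← specE_skip nums i hi h1]
      · rw [if_neg h1]
        by_cases h2 : nums.getD j 0 % 2 = 1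
        · rw [if_pos h2]
          rw [ih nums i (j + 2) hi (by omega) (by omega)]
          rw [← specO_skip nums j hj h2]
        · rw [if_neg h2]
          have hv1 : nums.getD i 0 % 2 = 1 := by omega
          have hv0 : nums.getD j 0 % 2 = 0 := by omega
          rw [ih ((nums.set i (nums.getD j 0)).set j (nums.getD i 0)) (i + 2) (j + 2)
                (by omega) (by omega) (by simp [List.length_set]; omega)]
          rw [specE_set nums i j _ _ hi hj, specO_set nums i j _ _ hi hj]
          rw [specE_head nums i h.1 hi hv1, specO_head nums j h.2 hj hv0]
          rw [List.zip_cons_cons, List.foldl_cons]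
          rfl
    · rw [if_neg h]
      by_cases hi' : i < nums.length
      · rw [specO_nil nums j (by omega), List.zip_nil_right]
        rfl
      · rw [specE_nil nums i (by omega), List.zip_nil_left]
        rfl

-- ===== VERDICT (by name: the statement is the Claim_ definition above) =====
theorem sortParityII_spec : Claim_equal_sortParityII := by
  intro nums _
  unfold Spec_sortParityII sortParityII sortParityII_alt
  rw [main_loop (nums.length + 1) nums 0 1 (by decide) (by decide) (by omega)]
  have e1 : specE nums 0
      = (List.range nums.length).filter
          (fun k => decide (k % 2 = 0) && decide (nums.getD k 0 % 2 = 1)) := by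
    unfold specE
    apply List.filter_congr
    intro k hk
    simp
  have e2 : specO nums 1
      = (List.range nums.length).filter
          (fun k => decide (k % 2 = 1) && decide (nums.getD k 0 % 2 = 0)) := by
    unfold specO
    apply List.filter_congr
    intro k hk
    by_cases h1 : k % 2 = 1
    · have hk1 : 1 ≤ k := by omega
      simp [h1, hk1]
    · simp [h1]
  rw [e1, e2]
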